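-- pv_equiv track=rewrite | github.com/donghojeon/passstudy | 3.statistics/complexity_analysis.py | classify_password_complexity
-- ===== SOURCE A (Python) =====
-- def count_chars_bit(password):
--     """비밀번호의 문자 유형을 비트마스크로 계산하여 복잡도 레벨을 반환합니다."""
--     upper, lower, number, special = 0, 0, 0, 0
--
--     for char in password:
--         if 'A' <= char <= 'Z':
--             upper = 0b100
--         elif 'a' <= char <= 'z':
--             lower = 0b1
--         elif '0' <= char <= '9':
--             number = 0b10
--         else:
--             special = 0b1000
--
--     # 비트마스크 합산 결과 반환
--     return upper + lower + number + special
--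
-- def classify_password_complexity(password_list):
--     """비밀번호 목록을 16가지 복잡도 레벨로 분류합니다."""
--     complexity_levels = {
--         0b0001: 'lowonly',
--         0b0010: 'numonly',
--         0b0100: 'uponly',
--         0b1000: 'spconly',
--         0b0011: 'lownum',
--         0b0101: 'uplow',
--         0b0110: 'upnum',
--         0b1001: 'spclow',
--         0b1010: 'spcnum',
--         0b1100: 'spcup',
--         0b0111: 'upnumlow',
--         0b1011: 'spcnumlow',
--         0b1101: 'spcuplow',
--         0b1110: 'spcupnum',
--         0b1111: 'all'
--     }
--
--     classified_passwords = {level: [] for level in complexity_levels.values()}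
--
--     for password in password_list:
--         complexity_bit = count_chars_bit(password)
--         complexity_level = complexity_levels.get(complexity_bit, 'unknown')
--         classified_passwords[complexity_level].append(password)
--
--     return classified_passwords
-- ===== SOURCE B (Python) =====
-- def classify_password_complexity(password_list):
--     """비밀번호 목록을 16가지 복잡도 레벨로 분류합니다."""
--     names = ['', 'lowonly', 'numonly', 'lownum', 'uponly', 'uplow', 'upnum',
--              'upnumlow', 'spconly', 'spclow', 'spcnum', 'spcnumlow', 'spcup',
--              'spcuplow', 'spcupnum', 'all']
--     buckets = {name: [] for name in ['lowonly', 'numonly', 'uponly', 'spconly',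
--                'lownum', 'uplow', 'upnum', 'spclow', 'spcnum', 'spcup',
--                'upnumlow', 'spcnumlow', 'spcuplow', 'spcupnum', 'all']}
--     for password in password_list:
--         mask = ((0b100 if any('A' <= c <= 'Z' for c in password) else 0)
--               | (0b1 if any('a' <= c <= 'z' for c in password) else 0)
--               | (0b10 if any('0' <= c <= '9' for c in password) else 0)
--               | (0b1000 if any(not ('A' <= c <= 'Z' or 'a' <= c <= 'z'
--                                     or '0' <= c <= '9') for c in password) else 0))
--         buckets[names[mask]].append(password)
--     return buckets
-- ===== Notes on version B (the rewrite author's own statement) =====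
-- stated objective: alternative
-- what changed: B replaces A's single stateful if/elif loop per password with four independent any() scans OR-ed into a bitmask and a direct 16-entry table (list) lookup instead of A's dict.get over a bitmask->name dict.
import Mathlib
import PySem

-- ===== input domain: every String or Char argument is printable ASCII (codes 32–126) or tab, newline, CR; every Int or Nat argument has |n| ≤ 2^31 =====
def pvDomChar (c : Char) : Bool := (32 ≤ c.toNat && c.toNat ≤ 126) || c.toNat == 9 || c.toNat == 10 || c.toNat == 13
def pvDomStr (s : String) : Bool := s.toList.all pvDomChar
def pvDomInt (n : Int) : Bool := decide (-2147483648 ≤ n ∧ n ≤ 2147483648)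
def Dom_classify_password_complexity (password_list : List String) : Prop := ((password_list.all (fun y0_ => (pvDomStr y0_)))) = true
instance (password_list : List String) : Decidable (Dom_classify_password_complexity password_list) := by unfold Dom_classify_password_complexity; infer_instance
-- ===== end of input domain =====

-- B classifies each password by four independent any-scans OR-ed into a bitmask and a
-- direct 16-entry table lookup, instead of A's single stateful if/elif pass and dict.get.


-- ===== PORT A =====
def ccbStep (st : Int × Int × Int × Int) (c : Char) : Int × Int × Int × Int :=
  if 'A' ≤ c ∧ c ≤ 'Z' then (4, st.2.1, st.2.2.1, st.2.2.2)
  else if 'a' ≤ c ∧ c ≤ 'z' then (st.1, 1, st.2.2.1, st.2.2.2)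
  else if '0' ≤ c ∧ c ≤ '9' then (st.1, st.2.1, 2, st.2.2.2)
  else (st.1, st.2.1, st.2.2.1, 8)

def count_chars_bit (password : String) : Int :=
  let st := password.toList.foldl ccbStep (0, 0, 0, 0)
  st.1 + st.2.1 + st.2.2.1 + st.2.2.2

def pvLevels : PySem.Dict Int String := PySem.Dict.ofList
  [(1, "lowonly"), (2, "numonly"), (4, "uponly"), (8, "spconly"), (3, "lownum"),
   (5, "uplow"), (6, "upnum"), (9, "spclow"), (10, "spcnum"), (12, "spcup"),
   (7, "upnumlow"), (11, "spcnumlow"), (13, "spcuplow"), (14, "spcupnum"), (15, "all")]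

-- classified_passwords = {level: [] for level in complexity_levels.values()}
def pvBucketsA : PySem.Dict String (List String) :=
  pvLevels.values.foldl (fun d lv => d.insert lv []) PySem.Dict.empty

-- classified_passwords[level].append(pw): the key is always present under Pre_, so modify is exact there
def classify_password_complexity (password_list : List String) : List (String × List String) :=
  (password_list.foldl (fun d pw =>
      d.modify (pvLevels.getD (count_chars_bit pw) "unknown") [] (· ++ [pw])) pvBucketsA).items

-- ===== PORT B =====
def pvNames : List String :=
  ["", "lowonly", "numonly", "lownum", "uponly", "uplow", "upnum", "upnumlow",
   "spconly", "spclow", "spcnum", "spcnumlow", "spcup", "spcuplow", "spcupnum", "all"]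

def pvMask (password : String) : Int :=
  PySem.Int.bor
    (PySem.Int.bor
      (PySem.Int.bor
        (if password.toList.any (fun c => decide ('A' ≤ c ∧ c ≤ 'Z')) then 4 else 0)
        (if password.toList.any (fun c => decide ('a' ≤ c ∧ c ≤ 'z')) then 1 else 0))
      (if password.toList.any (fun c => decide ('0' ≤ c ∧ c ≤ '9')) then 2 else 0))
    (if password.toList.any (fun c =>
        decide (¬ (('A' ≤ c ∧ c ≤ 'Z') ∨ ('a' ≤ c ∧ c ≤ 'z') ∨ ('0' ≤ c ∧ c ≤ '9')))) then 8 else 0)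

def pvBucketsB : PySem.Dict String (List String) :=
  ["lowonly", "numonly", "uponly", "spconly", "lownum", "uplow", "upnum", "spclow",
   "spcnum", "spcup", "upnumlow", "spcnumlow", "spcuplow", "spcupnum", "all"].foldl
    (fun d name => d.insert name []) PySem.Dict.empty

def classify_password_complexity_alt (password_list : List String) : List (String × List String) :=
  (password_list.foldl (fun d pw =>
      d.modify (PySem.List.pyGetD pvNames (pvMask pw) "") [] (· ++ [pw])) pvBucketsB).items

-- ===== PRECONDITION & SPEC =====
-- Pre_ excludes lists containing an empty password, on which A raises KeyError('unknown').
def Pre_classify_password_complexity (password_list : List String) : Prop :=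
  ∀ pw ∈ password_list, pw.toList ≠ []
instance (password_list : List String) : Decidable (Pre_classify_password_complexity password_list) := by unfold Pre_classify_password_complexity; infer_instance

def pvWitness_classify_password_complexity : List String := ["aB3!", "abc", "X9"]

def Spec_classify_password_complexity (password_list : List String) (out : List (String × List String)) : Prop := out = classify_password_complexity_alt password_list
instance (password_list : List String) (out : List (String × List String)) : Decidable (Spec_classify_password_complexity password_list out) := by unfold Spec_classify_password_complexity; infer_instance

-- ===== CLAIM (what is proved, stated in full; the proofs are below) =====
def Claim_equal_classify_password_complexity : Prop := ∀ (password_list : List String), Dom_classify_password_complexity password_list → Pre_classify_password_complexity password_list → Spec_classify_password_complexity password_list (classify_password_complexity password_list)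

-- ===== LEMMAS AND PROOFS =====

-- A's single pass sets each flag iff some character of that class occurs
theorem ccb_fold (cs : List Char) (u l n s : Int) :
    cs.foldl ccbStep (u, l, n, s) =
      ((if cs.any (fun c => decide ('A' ≤ c ∧ c ≤ 'Z')) then 4 else u),
       (if cs.any (fun c => decide ('a' ≤ c ∧ c ≤ 'z')) then 1 else l),
       (if cs.any (fun c => decide ('0' ≤ c ∧ c ≤ '9')) then 2 else n),
       (if cs.any (fun c =>
          decide (¬ (('A' ≤ c ∧ c ≤ 'Z') ∨ ('a' ≤ c ∧ c ≤ 'z') ∨ ('0' ≤ c ∧ c ≤ '9')))) then 8 else s)) := by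
  induction cs generalizing u l n s with
  | nil => simp
  | cons c cs ih =>
    by_cases hA : 'A' ≤ c ∧ c ≤ 'Z' <;>
      by_cases ha : 'a' ≤ c ∧ c ≤ 'z' <;>
        by_cases h0 : '0' ≤ c ∧ c ≤ '9' <;>
          simp [List.foldl_cons, ccbStep, hA, ha, h0, ih] <;>
          first
            | exact absurd (le_trans ha.1 hA.2) (by decide)
            | exact absurd (le_trans hA.1 h0.2) (by decide)
            | exact absurd (le_trans ha.1 h0.2) (by decide)
            | simp [not_lt.mpr hA.2]
            | simp [not_lt.mpr ha.2]
            | simp [not_lt.mpr h0.2]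

theorem mask_eq (pw : String) : count_chars_bit pw = pvMask pw := by
  unfold count_chars_bit pvMask
  rw [ccb_fold]
  split_ifs <;> decide

theorem name_eq (pw : String) (h : pw.toList ≠ []) :
    pvLevels.getD (count_chars_bit pw) "unknown" = PySem.List.pyGetD pvNames (pvMask pw) "" := by
  rw [mask_eq]
  unfold pvMask
  rcases hx : pw.toList with _ | ⟨c, cs⟩
  · exact absurd hx h
  cases hb1 : (c :: cs).any (fun c => decide ('A' ≤ c ∧ c ≤ 'Z')) <;>
    cases hb2 : (c :: cs).any (fun c => decide ('a' ≤ c ∧ c ≤ 'z')) <;>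
      cases hb3 : (c :: cs).any (fun c => decide ('0' ≤ c ∧ c ≤ '9')) <;>
        cases hb4 : (c :: cs).any (fun c =>
            decide (¬ (('A' ≤ c ∧ c ≤ 'Z') ∨ ('a' ≤ c ∧ c ≤ 'z') ∨ ('0' ≤ c ∧ c ≤ '9')))) <;>
          first
            | decide
            | (exfalso
               simp only [List.any_cons, Bool.or_eq_false_iff, decide_eq_false_iff_not] at hb1 hb2 hb3 hb4
               exact hb4.1 (fun hX => hX.elim hb1.1 (fun h' => h'.elim hb2.1 hb3.1)))

-- ===== VERDICT (by name: the statement is the Claim_ definition above) =====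
theorem classify_password_complexity_spec : Claim_equal_classify_password_complexity := by
  intro xs _ hpre
  unfold Spec_classify_password_complexity classify_password_complexity classify_password_complexity_alt
  rw [show pvBucketsA = pvBucketsB from by decide]
  congr 1
  apply PySem.List.foldl_congr_mem'
  intro pw hpw d
  rw [name_eq pw (hpre pw hpw)]
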